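-- pv_equiv track=rewrite | github.com/camcole04/ImageEncoder | imagecrypto/core/crypto.py | image_vigenere_encrypt
-- ===== SOURCE A (Python) =====
-- def image_vigenere_encrypt(pixel_array, key):
--     key_nums = [ord(c) for c in key]
--     key_len = len(key_nums)
--     encrypted = []
--     for i in range(len(pixel_array)):
--         encrypted_value = (pixel_array[i] + key_nums[i % key_len] * key_nums[i % key_len]) % 256
--         encrypted.append(encrypted_value)
--     return encrypted
-- ===== SOURCE B (Python) =====
-- def image_vigenere_encrypt(pixel_array, key):
--     n = len(pixel_array)
--     k = len(key)
--     encrypted = [0] * n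
--     for j in range(k):
--         sq = ord(key[j]) ** 2
--         for i in range(j, n, k):
--             encrypted[i] = (pixel_array[i] + sq) % 256
--     return encrypted
-- ===== Notes on version B (the rewrite author's own statement) =====
-- stated objective: alternative
-- what changed: Replaces A's single sequential pass (recomputing key_nums[i % key_len]**2 per pixel) with a preallocated output filled key-position by key-position: outer loop over key indices, inner strided loop, squaring each key byte once.
import Mathlib
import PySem

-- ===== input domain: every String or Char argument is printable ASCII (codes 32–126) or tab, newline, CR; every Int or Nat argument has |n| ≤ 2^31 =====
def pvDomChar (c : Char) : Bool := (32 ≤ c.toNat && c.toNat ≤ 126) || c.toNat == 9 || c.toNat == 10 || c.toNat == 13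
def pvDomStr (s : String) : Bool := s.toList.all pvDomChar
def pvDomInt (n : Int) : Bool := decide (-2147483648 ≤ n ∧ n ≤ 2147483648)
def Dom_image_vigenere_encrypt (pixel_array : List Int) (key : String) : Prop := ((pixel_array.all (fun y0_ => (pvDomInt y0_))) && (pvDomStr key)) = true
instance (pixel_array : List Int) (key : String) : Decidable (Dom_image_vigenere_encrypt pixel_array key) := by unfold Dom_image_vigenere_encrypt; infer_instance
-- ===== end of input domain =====

-- B replaces A's single sequential pass with a preallocated output filled by an
-- outer loop over key positions and an inner strided loop (each key byte squared once).

-- ===== PORT A =====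
def image_vigenere_encrypt (pixel_array : List Int) (key : String) : List Int :=
  let key_nums : List Int := key.toList.map (fun c => (c.toNat : Int))
  let key_len : Int := key_nums.length
  (PySem.List.pyRange 0 pixel_array.length 1).foldl
    (fun encrypted i =>
      encrypted ++ [PySem.Int.mod
        (PySem.List.pyGetD pixel_array i 0 +
          PySem.List.pyGetD key_nums (PySem.Int.mod i key_len) 0 *
          PySem.List.pyGetD key_nums (PySem.Int.mod i key_len) 0) 256]) []

-- ===== PORT B =====
def image_vigenere_encrypt_alt (pixel_array : List Int) (key : String) : List Int :=
  let n : Int := pixel_array.length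
  let k : Int := key.toList.length
  let encrypted : List Int := List.replicate pixel_array.length 0
  (PySem.List.pyRange 0 k 1).foldl
    (fun encrypted j =>
      let sq : Int := ((PySem.List.pyGetD key.toList j ' ').toNat : Int) ^ 2
      (PySem.List.pyRange j n k).foldl
        (fun encrypted i =>
          PySem.List.pySetD encrypted i (PySem.Int.mod (PySem.List.pyGetD pixel_array i 0 + sq) 256))
        encrypted)
    encrypted

-- ===== PRECONDITION & SPEC =====
-- Pre_ excludes only the inputs on which A raises ZeroDivisionError: an empty key
-- together with a non-empty pixel_array (i % key_len with key_len = 0).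
def Pre_image_vigenere_encrypt (pixel_array : List Int) (key : String) : Prop :=
  pixel_array = [] ∨ key ≠ ""
instance (pixel_array : List Int) (key : String) : Decidable (Pre_image_vigenere_encrypt pixel_array key) := by unfold Pre_image_vigenere_encrypt; infer_instance

def pvWitness_image_vigenere_encrypt : List Int × String := ([10, 200, 30], "ab")

def Spec_image_vigenere_encrypt (pixel_array : List Int) (key : String) (out : List Int) : Prop := out = image_vigenere_encrypt_alt pixel_array key
instance (pixel_array : List Int) (key : String) (out : List Int) : Decidable (Spec_image_vigenere_encrypt pixel_array key out) := by unfold Spec_image_vigenere_encrypt; infer_instance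

-- ===== CLAIM (what is proved, stated in full; the proofs are below) =====
def Claim_equal_image_vigenere_encrypt : Prop := ∀ (pixel_array : List Int) (key : String), Dom_image_vigenere_encrypt pixel_array key → Pre_image_vigenere_encrypt pixel_array key → Spec_image_vigenere_encrypt pixel_array key (image_vigenere_encrypt pixel_array key)

-- ===== LEMMAS AND PROOFS =====

-- the inner strided loop preserves length
lemma inner_len (g : Int → Int) (L : List Int) (e : List Int) :
    (L.foldl (fun e i => PySem.List.pySetD e i (g i)) e).length = e.length := by
  induction L generalizing e with
  | nil => rfl
  | cons i L ih => simp [List.foldl_cons, ih, PySem.List.length_pySetD]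

-- characterisation of the inner strided loop (nonnegative indices, value at i
-- depending only on i): position m ends up holding g m iff m occurs in L
lemma inner_getD (g : Int → Int) (L : List Int) (hL : ∀ i ∈ L, 0 ≤ i)
    (e : List Int) (m : Nat) (hm : m < e.length) :
    (L.foldl (fun e i => PySem.List.pySetD e i (g i)) e).getD m 0 =
      if (m : Int) ∈ L then g m else e.getD m 0 := by
  induction L generalizing e with
  | nil => simp
  | cons i L ih =>
    have hi0 : 0 ≤ i := hL i List.mem_cons_self
    rw [List.foldl_cons, ih (fun x hx => hL x (List.mem_cons_of_mem _ hx)) _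
      (by rw [PySem.List.length_pySetD]; exact hm)]
    by_cases hmem : (m : Int) ∈ L
    · rw [if_pos hmem, if_pos (List.mem_cons_of_mem _ hmem)]
    · rw [if_neg hmem]
      by_cases hi : i = (m : Int)
      · subst hi
        rw [if_pos List.mem_cons_self, PySem.List.pySetD_of_nonneg _ _ hi0]
        rw [List.getD_eq_getElem _ _ (by simpa using hm)]
        simp
      · rw [if_neg (by
          intro h
          rcases List.mem_cons.1 h with h | h
          · exact hi h.symm
          · exact hmem h)]
        by_cases hlt : i < (e.length : Int)
        · rw [PySem.List.pySetD_of_nonneg _ _ hi0]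
          have hne : i.toNat ≠ m := by omega
          rw [List.getD_eq_getElem _ _ (by simpa using hm),
            List.getD_eq_getElem _ _ hm]
          simp [hne]
        · have hnone : PySem.List.pySet? e i (g i) = none := by
            rw [PySem.List.pySet?_eq_none_iff]
            simp [PySem.Raise.InRange]
            omega
          simp [PySem.List.pySetD, hnone]

-- the outer loop preserves length
lemma outer_len (step : Int → Int → Int) (J : List Int) (n : Int) (k : Int) (e : List Int) :
    (J.foldl (fun e j => (PySem.List.pyRange j n k).foldl
        (fun e i => PySem.List.pySetD e i (step j i)) e) e).length = e.length := by
  induction J generalizing e with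
  | nil => rfl
  | cons j J ih => rw [List.foldl_cons, ih, inner_len]

-- invariant of the outer loop: after processing the key positions in J,
-- position m holds its final value iff m % k ∈ J
lemma outer_getD (step : Int → Int → Int) (J : List Int) (n k : Int) (hk : 0 < k)
    (hJ : ∀ j ∈ J, 0 ≤ j ∧ j < k) (e : List Int) (he : (e.length : Int) = n)
    (m : Nat) (hm : m < e.length) :
    (J.foldl (fun e j => (PySem.List.pyRange j n k).foldl
        (fun e i => PySem.List.pySetD e i (step j i)) e) e).getD m 0 =
      if PySem.Int.mod (m : Int) k ∈ J then step (PySem.Int.mod (m : Int) k) m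
      else e.getD m 0 := by
  have hme : PySem.Int.mod (m : Int) k = (m : Int) % k := PySem.Int.mod_eq_emod_of_pos hk
  induction J generalizing e with
  | nil => simp
  | cons j J ih =>
    rw [List.foldl_cons]
    have hlen : ((PySem.List.pyRange j n k).foldl
        (fun e i => PySem.List.pySetD e i (step j i)) e).length = e.length := inner_len _ _ _
    rw [ih (fun j hj => hJ j (List.mem_cons_of_mem _ hj)) _ (by rw [hlen]; exact he)
        (by rw [hlen]; exact hm)]
    have hj0 : 0 ≤ j ∧ j < k := hJ j List.mem_cons_self
    have hmodj : (m : Int) ∈ PySem.List.pyRange j n k ↔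
        ((m : Int) % k = j ∧ (m : Int) < n) := by
      rw [PySem.List.mem_pyRange_iff_of_pos hk]
      constructor
      · rintro ⟨h1, h2, c, hc⟩
        refine ⟨?_, h2⟩
        have hmc : (m : Int) = j + k * c := by omega
        rw [hmc, Int.add_mul_emod_self_left, Int.emod_eq_of_lt hj0.1 hj0.2]
      · rintro ⟨h1, h2⟩
        have h4 := Int.mul_ediv_add_emod (m : Int) k
        have hd : 0 ≤ k * ((m : Int) / k) :=
          mul_nonneg (le_of_lt hk) (Int.ediv_nonneg (by positivity) (le_of_lt hk))
        have h5 : 0 ≤ (m : Int) % k := Int.emod_nonneg _ (by omega)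
        have h6 := Int.emod_lt_of_pos (m : Int) hk
        have hjm : j ≤ (m : Int) := by
          rcases lt_or_ge (m : Int) k with h | h
          · rw [Int.emod_eq_of_lt (by positivity) h] at h1; omega
          · omega
        exact ⟨hjm, h2, (m : Int) / k, by omega⟩
    by_cases hmem : PySem.Int.mod (m : Int) k ∈ J
    · simp [hmem]
    · rw [if_neg hmem, inner_getD _ _ (fun i hi => by
        have := (PySem.List.mem_pyRange_iff_of_pos hk i).1 hi
        omega) _ _ hm]
      by_cases heq : PySem.Int.mod (m : Int) k = j
      · rw [if_pos (hmodj.2 ⟨by rw [← hme]; exact heq, by omega⟩),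
          if_pos (List.mem_cons.2 (Or.inl heq)), heq]
      · rw [if_neg (fun h => heq (by rw [hme]; exact (hmodj.1 h).1)), if_neg (by
          intro h
          rcases List.mem_cons.1 h with h | h
          · exact heq h
          · exact hmem h)]

-- ===== VERDICT (by name: the statement is the Claim_ definition above) =====
theorem image_vigenere_encrypt_spec : Claim_equal_image_vigenere_encrypt := by
  intro p key _ hpre
  unfold Spec_image_vigenere_encrypt
  have hBlen : (image_vigenere_encrypt_alt p key).length = p.length := by
    simp only [image_vigenere_encrypt_alt]
    rw [outer_len (fun j i => PySem.Int.mod (PySem.List.pyGetD p i 0 +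
      ((PySem.List.pyGetD key.toList j ' ').toNat : Int) ^ 2) 256)]
    simp
  have hAmap : image_vigenere_encrypt p key = (List.range p.length).map (fun (m : Nat) =>
      PySem.Int.mod (PySem.List.pyGetD p (m : Int) 0 +
        PySem.List.pyGetD (key.toList.map (fun c => (c.toNat : Int)))
          (PySem.Int.mod (m : Int) ((key.toList.map (fun c => (c.toNat : Int))).length : Int)) 0 *
        PySem.List.pyGetD (key.toList.map (fun c => (c.toNat : Int)))
          (PySem.Int.mod (m : Int) ((key.toList.map (fun c => (c.toNat : Int))).length : Int)) 0) 256) := by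
    simp only [image_vigenere_encrypt]
    rw [PySem.List.pyRange_zero_natCast, PySem.List.foldl_append_singleton_eq_map,
      List.nil_append, List.map_map]
    rfl
  by_cases hp : p = []
  · subst hp
    have hB : image_vigenere_encrypt_alt [] key = [] :=
      List.eq_nil_of_length_eq_zero (by simpa using hBlen)
    rw [hB, hAmap]
    simp
  · have hkey : key ≠ "" := hpre.resolve_left hp
    have hklist : key.toList ≠ [] := by
      simp only [ne_eq, String.toList_eq_nil_iff]; exact hkey
    have hk : 0 < (key.toList.length : Int) := by
      have := List.length_pos_iff.2 hklist
      exact_mod_cast this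
    apply List.ext_getElem (by rw [hBlen, hAmap]; simp)
    intro m h1 h2
    have hmn : m < p.length := by rw [hBlen] at h2; exact h2
    have ht0 := PySem.Int.mod_nonneg (m : Int) hk
    have htl := PySem.Int.mod_lt (m : Int) hk
    have hJ : ∀ j ∈ PySem.List.pyRange 0 (key.toList.length : Int) 1,
        0 ≤ j ∧ j < (key.toList.length : Int) := by
      intro j hj
      exact (PySem.List.mem_pyRange_one.1 hj)
    have hBval : (image_vigenere_encrypt_alt p key).getD m 0 =
        PySem.Int.mod (PySem.List.pyGetD p (m : Int) 0 +
          ((PySem.List.pyGetD key.toList (PySem.Int.mod (m : Int) (key.toList.length : Int)) ' ').toNat : Int) ^ 2) 256 := by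
      simp only [image_vigenere_encrypt_alt]
      rw [outer_getD (fun j i => PySem.Int.mod (PySem.List.pyGetD p i 0 +
          ((PySem.List.pyGetD key.toList j ' ').toNat : Int) ^ 2) 256)
        (PySem.List.pyRange 0 (key.toList.length : Int) 1) (p.length : Int)
        (key.toList.length : Int) hk hJ (List.replicate p.length 0) (by simp) m (by simpa using hmn)]
      rw [if_pos (PySem.List.mem_pyRange_one.2 ⟨ht0, htl⟩)]
    rw [show (image_vigenere_encrypt_alt p key)[m] = _ from
      (List.getD_eq_getElem _ 0 h2).symm.trans hBval]
    simp only [hAmap]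
    simp only [List.getElem_map, List.getElem_range]
    have hkn : PySem.List.pyGetD (key.toList.map (fun c => (c.toNat : Int)))
        (PySem.Int.mod (m : Int) (key.toList.length : Int)) 0 =
        ((PySem.List.pyGetD key.toList (PySem.Int.mod (m : Int) (key.toList.length : Int)) ' ').toNat : Int) := by
      rw [PySem.List.pyGetD_eq_getElem _ _ ht0 (by simpa using htl),
        PySem.List.pyGetD_eq_getElem _ _ ht0 htl]
      simp
    rw [List.length_map, hkn, ← pow_two]
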